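-- pv_equiv track=rewrite | github.com/AnthonyCalo/PythonAlgorithms | split_string_descend_consec_values.py | look_for_num
-- ===== SOURCE A (Python) =====
-- def look_for_num(s2: str, num: int):
--     numstring = str(num)
--     ns_len = len(numstring)
--     if ns_len > len(s2):
--         return 0,False
--     elif ns_len == len(s2):
--         return ns_len, numstring == s2
--     ns_idx = 0
--     leading_zero = True
--     for idx, char in enumerate(s2):
--         if leading_zero and char == "0":
--             continue
--         if char != numstring[ns_idx]:
--             return 0, False
--         elif char == numstring[ns_idx]:
--             if ns_idx == ns_len -1:
--                 return idx,True
--             leading_zero = False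
--             ns_idx += 1
--         else:
--             return 0, False
--     if num == 0:
--         return 10000, True
--     else:
--         return 0, False
-- ===== SOURCE B (Python) =====
-- def look_for_num(s2: str, num: int):
--     numstring = str(num)
--     ns_len = len(numstring)
--     if ns_len > len(s2):
--         return 0, False
--     if ns_len == len(s2):
--         return ns_len, numstring == s2
--     k = len(s2) - len(s2.lstrip('0'))
--     if num != 0:
--         if s2[k:k + ns_len] == numstring:
--             return k + ns_len - 1, True
--         return 0, False
--     return (10000, True) if k == len(s2) else (0, False)
-- ===== Notes on version B (the rewrite author's own statement) =====
-- stated objective: simpler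
-- what changed: A's char-by-char state machine over enumerate(s2) with (ns_idx, leading_zero) flags is replaced by counting the leading zeros via lstrip('0') and doing a single slice comparison s2[k:k+ns_len] == numstring (plus the explicit num == 0 all-zeros case).
import Mathlib
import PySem

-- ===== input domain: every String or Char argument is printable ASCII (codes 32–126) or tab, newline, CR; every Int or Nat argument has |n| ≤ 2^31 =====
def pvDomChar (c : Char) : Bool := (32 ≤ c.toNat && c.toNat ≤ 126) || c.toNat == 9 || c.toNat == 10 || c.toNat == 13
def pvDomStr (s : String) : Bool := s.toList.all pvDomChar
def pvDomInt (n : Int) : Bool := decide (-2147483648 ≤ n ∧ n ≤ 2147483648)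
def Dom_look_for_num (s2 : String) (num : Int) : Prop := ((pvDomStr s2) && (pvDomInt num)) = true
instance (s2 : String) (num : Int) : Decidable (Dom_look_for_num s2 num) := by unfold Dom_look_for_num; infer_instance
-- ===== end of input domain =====

-- B replaces A's char-by-char flag-driven scan by counting the leading zeros (lstrip) and one slice
-- comparison; objective: simpler. Both programs are total; equivalence is proved on the whole domain.

-- ===== PORT A =====
-- the for-loop over enumerate(s2) with state (ns_idx, leading_zero); early returns are the non-recursive branches
def look_for_num_loop (num : Int) (ns : List Char) (ns_len : Int) :
    List Char → Int → Int → Bool → Int × Bool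
  | [], _, _, _ => if num = 0 then (10000, true) else (0, false)
  | c :: rest, idx, ns_idx, lz =>
    if lz && (c == '0') then look_for_num_loop num ns ns_len rest (idx + 1) ns_idx lz
    else
      match PySem.List.pyGet? ns ns_idx with
      | none => (0, false)  -- unreachable: ns_idx always stays below ns_len
      | some nc =>
        if c ≠ nc then (0, false)
        else if ns_idx = ns_len - 1 then (idx, true)
        else look_for_num_loop num ns ns_len rest (idx + 1) (ns_idx + 1) false

def look_for_num (s2 : String) (num : Int) : Int × Bool :=
  let ns := PySem.Int.toChars num
  let ns_len : Int := ns.length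
  if ns_len > (s2.toList.length : Int) then (0, false)
  else if ns_len = (s2.toList.length : Int) then (ns_len, PySem.Int.toStr num == s2)
  else look_for_num_loop num ns ns_len s2.toList 0 0 true

-- ===== PORT B =====
def look_for_num_alt (s2 : String) (num : Int) : Int × Bool :=
  let ns := PySem.Int.toChars num
  let ns_len : Int := ns.length
  let cs := s2.toList
  let slen : Int := cs.length
  if ns_len > slen then (0, false)
  else if ns_len = slen then (ns_len, PySem.Int.toStr num == s2)
  else
    -- k = len(s2) - len(s2.lstrip('0')); s.lstrip('0') drops exactly the leading '0' characters (exact)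
    let k : Int := slen - ((cs.dropWhile (· == '0')).length : Int)
    if num ≠ 0 then
      -- s2[k:k+ns_len] == numstring
      if PySem.List.slice cs (some k) (some (k + ns_len)) = ns then (k + ns_len - 1, true)
      else (0, false)
    else if k = slen then (10000, true) else (0, false)

-- ===== PRECONDITION & SPEC =====
def Spec_look_for_num (s2 : String) (num : Int) (out : Int × Bool) : Prop := out = look_for_num_alt s2 num
instance (s2 : String) (num : Int) (out : Int × Bool) : Decidable (Spec_look_for_num s2 num out) := by unfold Spec_look_for_num; infer_instance

-- ===== CLAIM (what is proved, stated in full; the proofs are below) =====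
def Claim_equal_look_for_num : Prop := ∀ (s2 : String) (num : Int), Dom_look_for_num s2 num → Spec_look_for_num s2 num (look_for_num s2 num)

-- ===== LEMMAS AND PROOFS =====

lemma toDigitsCore_length_le (f : Nat) : ∀ (n : Nat) (acc : List Char),
    acc.length ≤ (Nat.toDigitsCore 10 f n acc).length := by
  induction f with
  | zero => intro n acc; simp [Nat.toDigitsCore]
  | succ f ih =>
    intro n acc
    simp only [Nat.toDigitsCore]
    split
    · simp
    · exact le_trans (by simp) (ih _ _)

lemma toChars_ne_nil (num : Int) : PySem.Int.toChars num ≠ [] := by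
  unfold PySem.Int.toChars
  split
  · simp
  · unfold Nat.toDigits
    simp only [Nat.toDigitsCore]
    split
    · simp
    · intro h
      have := toDigitsCore_length_le num.toNat (num.toNat / 10) [(num.toNat % 10).digitChar]
      rw [h] at this; simp at this

-- the compare phase of A's loop: once past the skipped zeros (head ≠ '0' while the flag is up),
-- the loop succeeds iff the rest of numstring is a prefix of the remaining characters
lemma loop_cmp (num : Int) (ns : List Char) :
    ∀ (cs : List Char) (j : Nat) (idx : Int) (b : Bool), j < ns.length →
    (b = true → ∀ c cs', cs = c :: cs' → c ≠ '0') →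
    look_for_num_loop num ns (ns.length : Int) cs idx (j : Int) b =
      if ns.drop j <+: cs then (idx + ((ns.length : Int) - 1 - j), true)
      else if cs <+: ns.drop j then (if num = 0 then (10000, true) else (0, false))
      else (0, false) := by
  intro cs
  induction cs with
  | nil =>
    intro j idx b hj _
    have hdrop : ns.drop j ≠ [] := by
      simp [List.drop_eq_nil_iff]; omega
    simp [look_for_num_loop, List.prefix_iff_eq_take, hdrop]
  | cons c rest ih =>
    intro j idx b hj hb
    have hget : PySem.List.pyGet? ns (j : Int) = some ns[j] := by
      simp [List.getElem?_eq_getElem hj]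
    have hdropj : ns.drop j = ns[j] :: ns.drop (j + 1) := List.drop_eq_getElem_cons hj
    have hskip : (b && (c == '0')) = false := by
      cases b with
      | false => rfl
      | true => simpa using hb rfl c rest rfl
    rw [look_for_num_loop]
    simp only [hskip, Bool.false_eq_true, if_false, hget]
    by_cases hc : c = ns[j]
    · by_cases hlast : j = ns.length - 1
      · have hj1 : (j : Int) = (ns.length : Int) - 1 := by omega
        have hdropnil : ns.drop (j + 1) = [] := by
          simp [List.drop_eq_nil_iff]; omega
        rw [if_neg (show ¬ (c ≠ ns[j]) by simp [hc]), if_pos hj1, hdropj, hdropnil]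
        rw [if_pos (show ns[j] :: ([] : List Char) <+: c :: rest by simp [List.cons_prefix_cons, hc])]
        have h0 : ((ns.length : Int) - 1 - (j : Int)) = 0 := by omega
        rw [h0]; ring_nf
      · have hj1 : ¬ ((j : Int) = (ns.length : Int) - 1) := by omega
        have hrec : look_for_num_loop num ns (ns.length : Int) rest (idx + 1) ((j : Int) + 1) false =
            if ns.drop (j + 1) <+: rest then (idx + 1 + ((ns.length : Int) - 1 - ((j : Int) + 1)), true)
            else if rest <+: ns.drop (j + 1) then (if num = 0 then (10000, true) else (0, false))
            else (0, false) := by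
          have := ih (j + 1) (idx + 1) false (by omega) (by simp)
          push_cast at this
          exact this
        rw [if_neg (show ¬ (c ≠ ns[j]) by simp [hc]), if_neg hj1, hrec]
        have e1 : (ns.drop j <+: c :: rest) ↔ ns.drop (j + 1) <+: rest := by
          rw [hdropj, List.cons_prefix_cons]; simp [hc]
        have e2 : (c :: rest <+: ns.drop j) ↔ rest <+: ns.drop (j + 1) := by
          rw [hdropj, List.cons_prefix_cons]; simp [hc]
        have e3 : idx + 1 + ((ns.length : Int) - 1 - ((j : Int) + 1)) =
            idx + ((ns.length : Int) - 1 - (j : Int)) := by ring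
        rw [e3]
        simp only [e1, e2]
    · have e1 : ¬ (ns.drop j <+: c :: rest) := by
        rw [hdropj, List.cons_prefix_cons]; exact fun h => hc h.1.symm
      have e2 : ¬ (c :: rest <+: ns.drop j) := by
        rw [hdropj, List.cons_prefix_cons]; exact fun h => hc h.1
      rw [if_pos (show c ≠ ns[j] from hc), if_neg e1, if_neg e2]

-- the skip phase of A's loop: with the flag up and ns_idx = 0 the loop just walks past leading zeros
lemma loop_skip (num : Int) (ns : List Char) :
    ∀ (cs : List Char) (idx : Int),
    look_for_num_loop num ns (ns.length : Int) cs idx 0 true =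
      look_for_num_loop num ns (ns.length : Int) (cs.dropWhile (· == '0'))
        (idx + ((cs.takeWhile (· == '0')).length : Int)) 0 true := by
  intro cs
  induction cs with
  | nil => intro idx; simp
  | cons c rest ih =>
    intro idx
    by_cases hc : c = '0'
    · have : look_for_num_loop num ns (ns.length : Int) (c :: rest) idx 0 true =
          look_for_num_loop num ns (ns.length : Int) rest (idx + 1) 0 true := by
        simp [look_for_num_loop, hc]
      rw [this, ih]
      simp [hc]
      ring_nf
    · simp [hc]

lemma head_dropWhile_ne_zero (cs : List Char) :
    ∀ c cs', cs.dropWhile (· == '0') = c :: cs' → c ≠ '0' := by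
  induction cs with
  | nil => intro c cs' h; simp at h
  | cons d tl ih =>
    intro c cs' h
    by_cases hd : d = '0'
    · simp only [List.dropWhile_cons, hd] at h
      exact ih c cs' (by simpa using h)
    · simp only [List.dropWhile_cons, beq_iff_eq, hd, if_false] at h
      cases h
      exact hd

lemma drop_takeWhile_length (cs : List Char) :
    cs.drop (cs.takeWhile (· == '0')).length = cs.dropWhile (· == '0') := by
  induction cs with
  | nil => rfl
  | cons c tl ih =>
    by_cases hc : c = '0' <;> simp [hc, ih]

lemma loop_cmp0 (num : Int) (ns : List Char) (hns : ns ≠ []) (cs : List Char) (idx : Int)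
    (hhead : ∀ c cs', cs = c :: cs' → c ≠ '0') :
    look_for_num_loop num ns (ns.length : Int) cs idx 0 true =
      if ns <+: cs then (idx + ((ns.length : Int) - 1), true)
      else if cs <+: ns then (if num = 0 then (10000, true) else (0, false))
      else (0, false) := by
  have h := loop_cmp num ns cs 0 idx true (List.length_pos_iff.mpr hns) (fun _ => hhead)
  simpa using h

theorem look_for_num_eq_alt (s2 : String) (num : Int) :
    look_for_num s2 num = look_for_num_alt s2 num := by
  simp only [look_for_num, look_for_num_alt]
  by_cases hgt : (((PySem.Int.toChars num).length : Int) > (s2.toList.length : Int))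
  · rw [if_pos hgt, if_pos hgt]
  · rw [if_neg hgt, if_neg hgt]
    by_cases heq : (((PySem.Int.toChars num).length : Int) = (s2.toList.length : Int))
    · rw [if_pos heq, if_pos heq]
    · rw [if_neg heq, if_neg heq]
      set ns := PySem.Int.toChars num with hns
      set cs := s2.toList with hcs
      set dw := cs.dropWhile (· == '0') with hdw
      set tw := cs.takeWhile (· == '0') with htw
      have hnsne : ns ≠ [] := toChars_ne_nil num
      have hsum : tw.length + dw.length = cs.length := by
        rw [htw, hdw, ← List.length_append, List.takeWhile_append_dropWhile]
      have hdrop : cs.drop tw.length = dw := drop_takeWhile_length cs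
      rw [loop_skip num ns cs 0,
        loop_cmp0 num ns hnsne dw (0 + (tw.length : Int)) (head_dropWhile_ne_zero cs)]
      have hk : (cs.length : Int) - (dw.length : Int) = (tw.length : Int) := by omega
      rw [hk]
      have hslice : PySem.List.slice cs (some (tw.length : Int))
          (some ((tw.length : Int) + (ns.length : Int))) = dw.take ns.length := by
        rw [PySem.List.slice_natCast_add, hdrop]
      rw [hslice]
      have hpref : (dw.take ns.length = ns) ↔ (ns <+: dw) :=
        ⟨fun h => h ▸ List.take_prefix _ _, fun h => (List.prefix_iff_eq_take.mp h).symm⟩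
      by_cases hnum : num = 0
      · rw [if_neg (show ¬ num ≠ 0 by simp [hnum])]
        have hns0 : ns = ['0'] := by rw [hns, hnum]; rfl
        by_cases hdwe : dw = []
        · have hkz : (tw.length : Int) = (cs.length : Int) := by
            have : dw.length = 0 := by rw [hdwe]; rfl
            omega
          rw [hdwe, if_neg (by rw [hns0]; simp), if_pos List.nil_prefix, if_pos hnum, if_pos hkz]
        · obtain ⟨c, rest, hdwc⟩ := List.exists_cons_of_ne_nil hdwe
          have hcne : c ≠ '0' := head_dropWhile_ne_zero cs c rest (by rw [← hdw]; exact hdwc)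
          have hnp1 : ¬ (ns <+: c :: rest) := by
            rw [hns0, List.cons_prefix_cons]; tauto
          have hnp2 : ¬ (c :: rest <+: ns) := by
            rw [hns0, List.cons_prefix_cons]; tauto
          have hkz : ¬ ((tw.length : Int) = (cs.length : Int)) := by
            have : dw.length ≠ 0 := by rw [hdwc]; simp
            omega
          rw [hdwc, if_neg hnp1, if_neg hnp2, if_neg hkz]
      · rw [if_pos hnum]
        by_cases h1 : ns <+: dw
        · rw [if_pos h1, if_pos (hpref.mpr h1)]
          have : (0 : Int) + (tw.length : Int) + ((ns.length : Int) - 1) =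
              (tw.length : Int) + (ns.length : Int) - 1 := by ring
          rw [this]
        · rw [if_neg h1, if_neg (fun h => h1 (hpref.mp h))]
          by_cases h2 : dw <+: ns
          · rw [if_pos h2, if_neg hnum]
          · rw [if_neg h2]

-- ===== VERDICT (by name: the statement is the Claim_ definition above) =====
theorem look_for_num_spec : Claim_equal_look_for_num := by
  intro s2 num _
  unfold Spec_look_for_num
  exact look_for_num_eq_alt s2 num
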